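-- pv_equiv track=rewrite | github.com/trongtranlee/leetcode | 1869-longest_contiguous_segment.py | checkZeroOnes
-- ===== SOURCE A (Python) =====
-- def checkZeroOnes(s:str)-> bool:
--     """
--     Input: s = "1101"
--     Output: true
--     Explanation:
--     The longest contiguous segment of 1s has length 2: "1101"
--     The longest contiguous segment of 0s has length 1: "1101"
--     The segment of 1s is longer, so return true.
--     """
--     max_length_1 = 0
--     max_length_0 = 0
--     count_1 = 0
--     count_0 = 0
--     for digit in s:
--         if digit == "1":
--             count_1 += 1
--             max_length_1 = max(count_1, max_length_1)
--             count_0 = 0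
--         else:
--             count_0 += 1
--             max_length_0 = max(count_0, max_length_0)
--             count_1 = 0
--
--     return max_length_1 > max_length_0
-- ===== SOURCE B (Python) =====
-- def checkZeroOnes(s: str) -> bool:
--     # Run-length encode s into (is_one, length) groups, then reduce per class.
--     runs = []
--     cur = None
--     n = 0
--     for c in s:
--         one = c == "1"
--         if one == cur:
--             n += 1
--         else:
--             if cur is not None:
--                 runs.append((cur, n))
--             cur = one
--             n = 1
--     if cur is not None:
--         runs.append((cur, n))
--     best1 = 0
--     best0 = 0
--     for one, length in runs:
--         if one:
--             best1 = max(best1, length)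
--         else:
--             best0 = max(best0, length)
--     return best1 > best0
-- ===== Notes on version B (the rewrite author's own statement) =====
-- stated objective: alternative
-- what changed: B run-length encodes the string into (digit-class, length) groups first and then reduces the group list to the two maxima, instead of A's single pass interleaving four running counters.
import Mathlib
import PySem

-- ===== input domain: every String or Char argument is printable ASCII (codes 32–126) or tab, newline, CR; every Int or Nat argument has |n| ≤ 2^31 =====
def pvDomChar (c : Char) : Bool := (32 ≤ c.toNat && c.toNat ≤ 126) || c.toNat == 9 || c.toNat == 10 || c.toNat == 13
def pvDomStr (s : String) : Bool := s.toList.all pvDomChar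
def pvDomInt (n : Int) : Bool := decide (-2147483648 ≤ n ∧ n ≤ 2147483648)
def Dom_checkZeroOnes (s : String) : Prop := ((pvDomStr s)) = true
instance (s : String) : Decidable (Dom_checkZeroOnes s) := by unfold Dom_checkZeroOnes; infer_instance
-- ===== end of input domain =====

-- B replaces A's single pass with four interleaved counters by a run-length encoding
-- of the string into (digit-class, length) groups followed by a reduction to the two
-- maxima (objective: alternative structure, same O(n) cost).

-- ===== PORT A =====
def checkZeroOnes (s : String) : Bool :=
  -- state: (max_length_1, max_length_0, count_1, count_0)
  let st := s.toList.foldl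
    (fun (st : Int × Int × Int × Int) digit =>
      if digit == '1' then
        (max (st.2.2.1 + 1) st.1, st.2.1, st.2.2.1 + 1, 0)
      else
        (st.1, max (st.2.2.2 + 1) st.2.1, 0, st.2.2.2 + 1))
    (0, 0, 0, 0)
  decide (st.2.1 < st.1)

-- ===== PORT B =====
-- append the pending run (if any) to the run list; `none` = Python's `cur is None`
def pvFinish (rs : List (Bool × Int)) (cur : Option Bool) (n : Int) : List (Bool × Int) :=
  match cur with
  | some b => rs ++ [(b, n)]
  | none => rs

def checkZeroOnes_alt (s : String) : Bool :=
  -- run-length encode: state (runs, cur, n)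
  let st := s.toList.foldl
    (fun (st : List (Bool × Int) × Option Bool × Int) c =>
      if st.2.1 = some (c == '1') then (st.1, st.2.1, st.2.2 + 1)
      else (pvFinish st.1 st.2.1 st.2.2, some (c == '1'), 1))
    ([], none, 0)
  let runs := pvFinish st.1 st.2.1 st.2.2
  -- reduce: (best1, best0)
  let best := runs.foldl
    (fun (p : Int × Int) r => if r.1 then (max p.1 r.2, p.2) else (p.1, max p.2 r.2))
    (0, 0)
  decide (best.2 < best.1)

-- ===== PRECONDITION & SPEC =====
def Spec_checkZeroOnes (s : String) (out : Bool) : Prop := out = checkZeroOnes_alt s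
instance (s : String) (out : Bool) : Decidable (Spec_checkZeroOnes s out) := by unfold Spec_checkZeroOnes; infer_instance

-- ===== CLAIM (what is proved, stated in full; the proofs are below) =====
def Claim_equal_checkZeroOnes : Prop := ∀ (s : String), Dom_checkZeroOnes s → Spec_checkZeroOnes s (checkZeroOnes s)

-- ===== LEMMAS AND PROOFS =====

-- A's loop body, named for the proofs (definitionally the lambda in checkZeroOnes)
def stepA (st : Int × Int × Int × Int) (digit : Char) : Int × Int × Int × Int :=
  if digit == '1' then
    (max (st.2.2.1 + 1) st.1, st.2.1, st.2.2.1 + 1, 0)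
  else
    (st.1, max (st.2.2.2 + 1) st.2.1, 0, st.2.2.2 + 1)

-- B's encoding loop body, named for the proofs
def stepB (st : List (Bool × Int) × Option Bool × Int) (c : Char) :
    List (Bool × Int) × Option Bool × Int :=
  if st.2.1 = some (c == '1') then (st.1, st.2.1, st.2.2 + 1)
  else (pvFinish st.1 st.2.1 st.2.2, some (c == '1'), 1)

-- B's reduction, named, and split into its two independent components
def red (rs : List (Bool × Int)) (p : Int × Int) : Int × Int :=
  rs.foldl (fun (p : Int × Int) r => if r.1 then (max p.1 r.2, p.2) else (p.1, max p.2 r.2)) p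

def red1 (rs : List (Bool × Int)) (a : Int) : Int :=
  rs.foldl (fun a r => if r.1 then max a r.2 else a) a

def red0 (rs : List (Bool × Int)) (a : Int) : Int :=
  rs.foldl (fun a r => if r.1 then a else max a r.2) a

-- the run decomposition of cs, starting inside a run of class b of current length n
def runsGo : List Char → Bool → Int → List (Bool × Int)
  | [], b, n => [(b, n)]
  | c :: cs, b, n =>
    if (c == '1') = b then runsGo cs b (n + 1)
    else (b, n) :: runsGo cs (c == '1') 1

theorem checkZeroOnes_eq (s : String) :
    checkZeroOnes s =
      decide ((s.toList.foldl stepA (0, 0, 0, 0)).2.1 < (s.toList.foldl stepA (0, 0, 0, 0)).1) := rfl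

theorem checkZeroOnes_alt_eq (s : String) :
    checkZeroOnes_alt s =
      decide ((red (pvFinish (s.toList.foldl stepB ([], none, 0)).1
                             (s.toList.foldl stepB ([], none, 0)).2.1
                             (s.toList.foldl stepB ([], none, 0)).2.2) (0, 0)).2 <
              (red (pvFinish (s.toList.foldl stepB ([], none, 0)).1
                             (s.toList.foldl stepB ([], none, 0)).2.1
                             (s.toList.foldl stepB ([], none, 0)).2.2) (0, 0)).1) := rfl

theorem foldB_spec (cs : List Char) : ∀ (rs : List (Bool × Int)) (b : Bool) (n : Int),
    pvFinish (cs.foldl stepB (rs, some b, n)).1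
             (cs.foldl stepB (rs, some b, n)).2.1
             (cs.foldl stepB (rs, some b, n)).2.2 = rs ++ runsGo cs b n := by
  induction cs with
  | nil => intro rs b n; rfl
  | cons c cs ih =>
    intro rs b n
    by_cases hc : (c == '1') = b
    · have hs : stepB (rs, some b, n) c = (rs, some b, n + 1) := by
        simp [stepB, hc]
      have hr : runsGo (c :: cs) b n = runsGo cs b (n + 1) := by
        simp [runsGo, hc]
      rw [List.foldl_cons, hs, hr, ih]
    · have hb : ¬ (b = (c == '1')) := fun h => hc h.symm
      have hs : stepB (rs, some b, n) c = (rs ++ [(b, n)], some (c == '1'), 1) := by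
        simp [stepB, pvFinish, hb]
      have hr : runsGo (c :: cs) b n = (b, n) :: runsGo cs (c == '1') 1 := by
        simp [runsGo, hc]
      rw [List.foldl_cons, hs, hr, ih, List.append_assoc, List.singleton_append]

theorem red_eq (rs : List (Bool × Int)) : ∀ (p : Int × Int),
    red rs p = (red1 rs p.1, red0 rs p.2) := by
  induction rs with
  | nil => intro p; rfl
  | cons r rs ih =>
    intro p
    simp only [red, red1, red0, List.foldl_cons] at ih ⊢
    by_cases h : r.1 = true <;>
      simp only [h, if_true, Bool.false_eq_true, reduceIte] <;>
      simpa using ih _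

theorem red1_hoist (rs : List (Bool × Int)) : ∀ (a b : Int),
    red1 rs (max a b) = max a (red1 rs b) := by
  induction rs with
  | nil => intro a b; rfl
  | cons r rs ih =>
    intro a b
    simp only [red1, List.foldl_cons] at ih ⊢
    by_cases h : r.1 = true <;> simp only [h, if_true, Bool.false_eq_true, reduceIte]
    · rw [max_assoc]; exact ih a (max b r.2)
    · exact ih a b

theorem red0_hoist (rs : List (Bool × Int)) : ∀ (a b : Int),
    red0 rs (max a b) = max a (red0 rs b) := by
  induction rs with
  | nil => intro a b; rfl
  | cons r rs ih =>
    intro a b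
    simp only [red0, List.foldl_cons] at ih ⊢
    by_cases h : r.1 = true <;> simp only [h, if_true, Bool.false_eq_true, reduceIte]
    · exact ih a b
    · rw [max_assoc]; exact ih a (max b r.2)

theorem red1_ge (rs : List (Bool × Int)) : ∀ (a : Int), a ≤ red1 rs a := by
  induction rs with
  | nil => intro a; exact le_refl a
  | cons r rs ih =>
    intro a
    simp only [red1, List.foldl_cons] at ih ⊢
    by_cases h : r.1 = true <;> simp only [h, if_true, Bool.false_eq_true, reduceIte]
    · exact le_trans (le_max_left a r.2) (ih _)
    · exact ih a

theorem red0_ge (rs : List (Bool × Int)) : ∀ (a : Int), a ≤ red0 rs a := by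
  induction rs with
  | nil => intro a; exact le_refl a
  | cons r rs ih =>
    intro a
    simp only [red0, List.foldl_cons] at ih ⊢
    by_cases h : r.1 = true <;> simp only [h, if_true, Bool.false_eq_true, reduceIte]
    · exact ih a
    · exact le_trans (le_max_left a r.2) (ih _)

theorem red1_runsGo_ge (cs : List Char) : ∀ (n : Int),
    n ≤ red1 (runsGo cs true n) 0 := by
  induction cs with
  | nil =>
    intro n
    have : red1 (runsGo [] true n) 0 = max 0 n := rfl
    rw [this]; omega
  | cons c cs ih =>
    intro n
    by_cases hc : (c == '1') = true
    · have hr : runsGo (c :: cs) true n = runsGo cs true (n + 1) := by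
        simp [runsGo, hc]
      rw [hr]; have := ih (n + 1); omega
    · have hr : runsGo (c :: cs) true n = (true, n) :: runsGo cs (c == '1') 1 := by
        simp [runsGo, hc]
      have h2 : red1 ((true, n) :: runsGo cs (c == '1') 1) 0 =
          red1 (runsGo cs (c == '1') 1) (max 0 n) := rfl
      rw [hr, h2]
      have := red1_ge (runsGo cs (c == '1') 1) (max 0 n); omega

theorem red0_runsGo_ge (cs : List Char) : ∀ (n : Int),
    n ≤ red0 (runsGo cs false n) 0 := by
  induction cs with
  | nil =>
    intro n
    have : red0 (runsGo [] false n) 0 = max 0 n := rfl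
    rw [this]; omega
  | cons c cs ih =>
    intro n
    by_cases hc : (c == '1') = false
    · have hr : runsGo (c :: cs) false n = runsGo cs false (n + 1) := by
        simp [runsGo, hc]
      rw [hr]; have := ih (n + 1); omega
    · have hc' : (c == '1') = true := by revert hc; cases (c == '1') <;> simp
      have hr : runsGo (c :: cs) false n = (false, n) :: runsGo cs (c == '1') 1 := by
        simp [runsGo, hc']
      have h2 : red0 ((false, n) :: runsGo cs (c == '1') 1) 0 =
          red0 (runsGo cs (c == '1') 1) (max 0 n) := rfl
      rw [hr, h2]
      have := red0_ge (runsGo cs (c == '1') 1) (max 0 n); omega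

-- main invariant: A's fold, currently inside a run of class b of current length n with
-- maxima m1 m0 already accounting for n, computes exactly B's reduction of the run
-- decomposition of the rest
theorem foldA_runsGo (cs : List Char) : ∀ (b : Bool) (n m1 m0 : Int),
    0 ≤ m1 → 0 ≤ m0 → (cond b (n ≤ m1) (n ≤ m0)) →
    ((cs.foldl stepA (cond b (m1, m0, n, 0) (m1, m0, 0, n))).1,
     (cs.foldl stepA (cond b (m1, m0, n, 0) (m1, m0, 0, n))).2.1) =
      red (runsGo cs b n) (m1, m0) := by
  induction cs with
  | nil =>
    intro b n m1 m0 hm1 hm0 hb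
    cases b
    · simp only [Bool.cond_false] at hb ⊢
      have : red (runsGo [] false n) (m1, m0) = (m1, max m0 n) := rfl
      rw [this, List.foldl_nil]
      simp only [Prod.mk.injEq]
      refine ⟨?_, ?_⟩ <;> first | trivial | omega
    · simp only [Bool.cond_true] at hb ⊢
      have : red (runsGo [] true n) (m1, m0) = (max m1 n, m0) := rfl
      rw [this, List.foldl_nil]
      simp only [Prod.mk.injEq]
      refine ⟨?_, ?_⟩ <;> first | trivial | omega
  | cons c cs ih =>
    intro b n m1 m0 hm1 hm0 hb
    cases b with
    | true =>
      simp only [Bool.cond_true] at hb ⊢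
      by_cases hc : (c == '1') = true
      · -- the 1-run continues
        have hA : stepA (m1, m0, n, 0) c = (max (n + 1) m1, m0, n + 1, 0) := by
          simp [stepA, hc]
        have hr : runsGo (c :: cs) true n = runsGo cs true (n + 1) := by
          simp [runsGo, hc]
        rw [List.foldl_cons, hA, hr]
        have hIH := ih true (n + 1) (max (n + 1) m1) m0 (by omega) hm0
          (by simp only [Bool.cond_true]; omega)
        simp only [Bool.cond_true] at hIH
        rw [hIH, red_eq, red_eq]
        dsimp only
        have hge := red1_runsGo_ge cs (n + 1)
        have e1 : red1 (runsGo cs true (n + 1)) (max (n + 1) m1) =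
            max (n + 1) (red1 (runsGo cs true (n + 1)) m1) := red1_hoist _ _ _
        have e2 : red1 (runsGo cs true (n + 1)) m1 =
            max m1 (red1 (runsGo cs true (n + 1)) 0) := by
          rw [← red1_hoist]; congr 1; omega
        simp only [e1, e2, Prod.mk.injEq]
        refine ⟨?_, ?_⟩ <;> first | trivial | omega
      · -- the 1-run ends; a 0-run of length 1 starts
        have hcf : (c == '1') = false := by revert hc; cases (c == '1') <;> simp
        have hA : stepA (m1, m0, n, 0) c = (m1, max 1 m0, 0, 1) := by
          simp [stepA, hcf]
        have hr : runsGo (c :: cs) true n = (true, n) :: runsGo cs (c == '1') 1 := by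
          simp [runsGo, hc]
        rw [List.foldl_cons, hA, hr]
        have hred : red ((true, n) :: runsGo cs (c == '1') 1) (m1, m0) =
            red (runsGo cs (c == '1') 1) (max m1 n, m0) := rfl
        rw [hred, hcf]
        have hb' : max m1 n = m1 := by omega
        rw [hb']
        have hIH := ih false 1 m1 (max 1 m0) hm1 (by omega)
          (by simp only [Bool.cond_false]; omega)
        simp only [Bool.cond_false] at hIH
        rw [hIH, red_eq, red_eq]
        dsimp only
        have hge := red0_runsGo_ge cs 1
        have e1 : red0 (runsGo cs false 1) (max 1 m0) =
            max 1 (red0 (runsGo cs false 1) m0) := red0_hoist _ _ _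
        have e2 : red0 (runsGo cs false 1) m0 =
            max m0 (red0 (runsGo cs false 1) 0) := by
          rw [← red0_hoist]; congr 1; omega
        simp only [e1, e2, Prod.mk.injEq]
        refine ⟨?_, ?_⟩ <;> first | trivial | omega
    | false =>
      simp only [Bool.cond_false] at hb ⊢
      by_cases hc : (c == '1') = true
      · -- the 0-run ends; a 1-run of length 1 starts
        have hA : stepA (m1, m0, 0, n) c = (max 1 m1, m0, 1, 0) := by
          simp [stepA, hc]
        have hr : runsGo (c :: cs) false n = (false, n) :: runsGo cs (c == '1') 1 := by
          simp [runsGo, hc]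
        rw [List.foldl_cons, hA, hr]
        have hred : red ((false, n) :: runsGo cs (c == '1') 1) (m1, m0) =
            red (runsGo cs (c == '1') 1) (m1, max m0 n) := rfl
        rw [hred, hc]
        have hb' : max m0 n = m0 := by omega
        rw [hb']
        have hIH := ih true 1 (max 1 m1) m0 (by omega) hm0
          (by simp only [Bool.cond_true]; omega)
        simp only [Bool.cond_true] at hIH
        rw [hIH, red_eq, red_eq]
        dsimp only
        have hge := red1_runsGo_ge cs 1
        have e1 : red1 (runsGo cs true 1) (max 1 m1) =
            max 1 (red1 (runsGo cs true 1) m1) := red1_hoist _ _ _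
        have e2 : red1 (runsGo cs true 1) m1 =
            max m1 (red1 (runsGo cs true 1) 0) := by
          rw [← red1_hoist]; congr 1; omega
        simp only [e1, e2, Prod.mk.injEq]
        refine ⟨?_, ?_⟩ <;> first | trivial | omega
      · -- the 0-run continues
        have hcf : (c == '1') = false := by revert hc; cases (c == '1') <;> simp
        have hA : stepA (m1, m0, 0, n) c = (m1, max (n + 1) m0, 0, n + 1) := by
          simp [stepA, hcf]
        have hr : runsGo (c :: cs) false n = runsGo cs false (n + 1) := by
          simp [runsGo, hcf]
        rw [List.foldl_cons, hA, hr]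
        have hIH := ih false (n + 1) m1 (max (n + 1) m0) hm1 (by omega)
          (by simp only [Bool.cond_false]; omega)
        simp only [Bool.cond_false] at hIH
        rw [hIH, red_eq, red_eq]
        dsimp only
        have hge := red0_runsGo_ge cs (n + 1)
        have e1 : red0 (runsGo cs false (n + 1)) (max (n + 1) m0) =
            max (n + 1) (red0 (runsGo cs false (n + 1)) m0) := red0_hoist _ _ _
        have e2 : red0 (runsGo cs false (n + 1)) m0 =
            max m0 (red0 (runsGo cs false (n + 1)) 0) := by
          rw [← red0_hoist]; congr 1; omega
        simp only [e1, e2, Prod.mk.injEq]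
        refine ⟨?_, ?_⟩ <;> first | trivial | omega

-- ===== VERDICT (by name: the statement is the Claim_ definition above) =====
theorem checkZeroOnes_spec : Claim_equal_checkZeroOnes := by
  intro s _
  unfold Spec_checkZeroOnes
  rw [checkZeroOnes_eq, checkZeroOnes_alt_eq]
  cases hcs : s.toList with
  | nil => rfl
  | cons c cs =>
    simp only [List.foldl_cons]
    by_cases hc : (c == '1') = true
    · -- the first character opens a 1-run
      have hA : stepA (0, 0, 0, 0) c = ((1 : Int), (0 : Int), (1 : Int), (0 : Int)) := by
        simp [stepA, hc]
      have hB : stepB ([], none, 0) c = ([], some (c == '1'), 1) := by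
        simp [stepB, pvFinish]
      simp only [hA, hB, hc]
      have hruns := foldB_spec cs [] true 1
      simp only [hruns, List.nil_append]
      have hfold := foldA_runsGo cs true 1 1 0 (by omega) (by omega)
        (by simp only [Bool.cond_true]; omega)
      simp only [Bool.cond_true] at hfold
      have h1 : (List.foldl stepA ((1 : Int), (0 : Int), (1 : Int), (0 : Int)) cs).1 =
          (red (runsGo cs true 1) (1, 0)).1 := by rw [← hfold]
      have h2 : (List.foldl stepA ((1 : Int), (0 : Int), (1 : Int), (0 : Int)) cs).2.1 =
          (red (runsGo cs true 1) (1, 0)).2 := by rw [← hfold]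
      have hA2 : red (runsGo cs true 1) (1, 0) =
          (red1 (runsGo cs true 1) 1, red0 (runsGo cs true 1) 0) := red_eq _ _
      have hB2 : red (runsGo cs true 1) (0, 0) =
          (red1 (runsGo cs true 1) 0, red0 (runsGo cs true 1) 0) := red_eq _ _
      simp only [decide_eq_decide]
      rw [h1, h2, hA2, hB2]
      dsimp only
      have hge := red1_runsGo_ge cs 1
      have e1 : red1 (runsGo cs true 1) 1 = max 1 (red1 (runsGo cs true 1) 0) := by
        have h10 : (max (1 : Int) 0) = 1 := by omega
        rw [← red1_hoist, h10]
      rw [e1]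
      constructor <;> intro h <;> omega
    · -- the first character opens a 0-run
      have hcf : (c == '1') = false := by revert hc; cases (c == '1') <;> simp
      have hA : stepA (0, 0, 0, 0) c = ((0 : Int), (1 : Int), (0 : Int), (1 : Int)) := by
        simp [stepA, hcf]
      have hB : stepB ([], none, 0) c = ([], some (c == '1'), 1) := by
        simp [stepB, pvFinish]
      simp only [hA, hB, hcf]
      have hruns := foldB_spec cs [] false 1
      simp only [hruns, List.nil_append]
      have hfold := foldA_runsGo cs false 1 0 1 (by omega) (by omega)
        (by simp only [Bool.cond_false]; omega)
      simp only [Bool.cond_false] at hfold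
      have h1 : (List.foldl stepA ((0 : Int), (1 : Int), (0 : Int), (1 : Int)) cs).1 =
          (red (runsGo cs false 1) (0, 1)).1 := by rw [← hfold]
      have h2 : (List.foldl stepA ((0 : Int), (1 : Int), (0 : Int), (1 : Int)) cs).2.1 =
          (red (runsGo cs false 1) (0, 1)).2 := by rw [← hfold]
      have hA2 : red (runsGo cs false 1) (0, 1) =
          (red1 (runsGo cs false 1) 0, red0 (runsGo cs false 1) 1) := red_eq _ _
      have hB2 : red (runsGo cs false 1) (0, 0) =
          (red1 (runsGo cs false 1) 0, red0 (runsGo cs false 1) 0) := red_eq _ _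
      simp only [decide_eq_decide]
      rw [h1, h2, hA2, hB2]
      dsimp only
      have hge := red0_runsGo_ge cs 1
      have e0 : red0 (runsGo cs false 1) 1 = max 1 (red0 (runsGo cs false 1) 0) := by
        have h10 : (max (1 : Int) 0) = 1 := by omega
        rw [← red0_hoist, h10]
      rw [e0]
      constructor <;> intro h <;> omega
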